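-- pv_equiv track=rewrite | github.com/cgl021/findsgjobs_app_3 | pages/2_Gap_Analysis.py | _summarise_keyword_themes
-- ===== SOURCE A (Python) =====
-- from typing import List, Dict, Tuple
--
-- THEME_KEYWORDS = [
--     ("Digital marketing & campaigns", {"campaign", "campaigns", "digital", "social", "media", "facebook", "instagram", "tiktok", "content", "copy", "awareness", "attract", "acquisition", "ads", "advertising", "seo", "sem", "brand", "branding", "growth"}),
--     ("Analytics & performance reporting", {"analyze", "analysis", "analytics", "report", "reports", "reporting", "performance", "metrics", "kpi", "kpis", "dashboard", "insight", "insights", "data"}),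
--     ("Stakeholder & communication", {"stakeholder", "stakeholders", "communication", "communications", "present", "presentation", "presentations", "collaborate", "collaboration", "coordinate", "coordination", "manage", "management", "client", "clients", "partner", "partners", "marketing"}),
--     ("Operations & planning", {"plan", "planning", "strategy", "strategic", "execute", "execution", "activities", "timeline", "project", "projects", "operations", "operational", "process"}),
--     ("Customer & market engagement", {"customer", "customers", "audience", "audiences", "retention", "satisfaction", "persona", "personas", "market", "markets", "survey"}),
--     ("Tools & platforms", {"tools", "platforms", "system", "systems", "crm", "hubspot", "salesforce", "excel", "powerpoint", "powerbi", "tableau", "google", "analytics"}),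
--     ("Compliance & governance", {"policy", "policies", "regulation", "regulations", "governance", "risk", "audit", "audits"}),
-- ]
--
-- def _format_keywords_for_sentence(words: List[str]) -> str:
--     """Turn a list of keywords into a natural-sounding phrase."""
--     if not words:
--         return ""
--     words = [w for w in words if w]
--     if not words:
--         return ""
--     if len(words) == 1:
--         return words[0]
--     if len(words) == 2:
--         return f"{words[0]} and {words[1]}"
--     return f"{', '.join(words[:-1])}, and {words[-1]}"
--
-- def _summarise_keyword_themes(keywords: List[str], max_items: int = 4) -> List[str]:
--     """Group raw keyword tokens into human-readable themes."""
--     keywords = [k.lower() for k in keywords if len(k) > 2]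
--     if not keywords:
--         return []
--
--     used = set()
--     statements: List[str] = []
--
--     for theme, vocab in THEME_KEYWORDS:
--         matched = [kw for kw in keywords if kw in vocab and kw not in used]
--         if not matched:
--             continue
--         formatted = _format_keywords_for_sentence(matched[:4])
--         statements.append(f"{theme}: emphasise {formatted}.")
--         used.update(matched)
--         if len(statements) >= max_items:
--             break
--
--     leftovers = [kw for kw in keywords if kw not in used]
--     if leftovers and len(statements) < max_items:
--         chunk_size = 3
--         for i in range(0, len(leftovers), chunk_size):
--             chunk = leftovers[i:i + chunk_size]
--             formatted = _format_keywords_for_sentence(chunk)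
--             statements.append(f"Highlight relevant experience with {formatted}.")
--             if len(statements) >= max_items:
--                 break
--
--     return statements
-- ===== SOURCE B (Python) =====
-- from typing import List
--
-- THEME_KEYWORDS = [
--     ("Digital marketing & campaigns", {"campaign", "campaigns", "digital", "social", "media", "facebook", "instagram", "tiktok", "content", "copy", "awareness", "attract", "acquisition", "ads", "advertising", "seo", "sem", "brand", "branding", "growth"}),
--     ("Analytics & performance reporting", {"analyze", "analysis", "analytics", "report", "reports", "reporting", "performance", "metrics", "kpi", "kpis", "dashboard", "insight", "insights", "data"}),
--     ("Stakeholder & communication", {"stakeholder", "stakeholders", "communication", "communications", "present", "presentation", "presentations", "collaborate", "collaboration", "coordinate", "coordination", "manage", "management", "client", "clients", "partner", "partners", "marketing"}),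
--     ("Operations & planning", {"plan", "planning", "strategy", "strategic", "execute", "execution", "activities", "timeline", "project", "projects", "operations", "operational", "process"}),
--     ("Customer & market engagement", {"customer", "customers", "audience", "audiences", "retention", "satisfaction", "persona", "personas", "market", "markets", "survey"}),
--     ("Tools & platforms", {"tools", "platforms", "system", "systems", "crm", "hubspot", "salesforce", "excel", "powerpoint", "powerbi", "tableau", "google", "analytics"}),
--     ("Compliance & governance", {"policy", "policies", "regulation", "regulations", "governance", "risk", "audit", "audits"}),
-- ]
--
-- def _format_keywords_for_sentence(words: List[str]) -> str:
--     """Turn a list of keywords into a natural-sounding phrase."""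
--     if not words:
--         return ""
--     words = [w for w in words if w]
--     if not words:
--         return ""
--     if len(words) == 1:
--         return words[0]
--     if len(words) == 2:
--         return f"{words[0]} and {words[1]}"
--     return f"{', '.join(words[:-1])}, and {words[-1]}"
--
-- def _summarise_keyword_themes(keywords: List[str], max_items: int = 4) -> List[str]:
--     """Group raw keyword tokens into human-readable themes (sieve version)."""
--     kws = [k.lower() for k in keywords if len(k) > 2]
--
--     # Sieve: each keyword is bucketed into the first theme whose vocabulary
--     # contains it, and removed from the pool before the next theme is tried.
--     groups = []
--     remaining = kws
--     for theme, vocab in THEME_KEYWORDS: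
--         groups.append((theme, [kw for kw in remaining if kw in vocab]))
--         remaining = [kw for kw in remaining if kw not in vocab]
--
--     statements: List[str] = []
--     used = set()
--     for theme, group in groups:
--         if not group:
--             continue
--         statements.append(f"{theme}: emphasise {_format_keywords_for_sentence(group[:4])}.")
--         used.update(group)
--         if len(statements) >= max_items:
--             break
--
--     leftovers = [kw for kw in kws if kw not in used]
--     room = max_items - len(statements)
--     if room > 0:
--         chunks = [leftovers[i:i + 3] for i in range(0, len(leftovers), 3)]
--         statements += [f"Highlight relevant experience with {_format_keywords_for_sentence(c)}." for c in chunks][:room]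
--     return statements
-- ===== Notes on version B (the rewrite author's own statement) =====
-- stated objective: alternative
-- what changed: A filters the whole keyword list once per theme against a growing `used` set and breaks out of both output loops; B sieves the keywords once into per-theme buckets (each keyword removed from the pool at its first matching theme), emits statements from the precomputed buckets, and truncates the leftover chunk list arithmetically instead of breaking out of a loop.
import Mathlib
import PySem

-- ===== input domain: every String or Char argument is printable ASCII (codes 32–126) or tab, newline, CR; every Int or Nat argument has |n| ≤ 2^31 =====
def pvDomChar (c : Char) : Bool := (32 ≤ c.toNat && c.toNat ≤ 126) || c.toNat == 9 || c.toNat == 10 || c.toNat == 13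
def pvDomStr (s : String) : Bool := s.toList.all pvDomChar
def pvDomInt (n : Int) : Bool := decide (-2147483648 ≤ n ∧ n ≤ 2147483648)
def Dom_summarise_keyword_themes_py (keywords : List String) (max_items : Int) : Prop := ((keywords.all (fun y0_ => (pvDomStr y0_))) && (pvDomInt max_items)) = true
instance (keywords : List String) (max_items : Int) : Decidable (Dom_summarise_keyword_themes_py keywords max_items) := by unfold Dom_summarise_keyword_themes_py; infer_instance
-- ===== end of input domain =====

-- B replaces A's per-theme re-filtering of the keyword list against a growing `used` set by a
-- one-shot sieve that buckets each keyword into the first theme containing it, and replaces A's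
-- break-out chunk loop by truncating the list of leftover chunks (objective: alternative).

-- ===== PORT A =====
-- shared module-level constant THEME_KEYWORDS (vocabularies are Python sets)
def pvThemes : List (String × PySem.Set String) := [
  ("Digital marketing & campaigns", PySem.Set.ofList ["campaign", "campaigns", "digital", "social", "media", "facebook", "instagram", "tiktok", "content", "copy", "awareness", "attract", "acquisition", "ads", "advertising", "seo", "sem", "brand", "branding", "growth"]),
  ("Analytics & performance reporting", PySem.Set.ofList ["analyze", "analysis", "analytics", "report", "reports", "reporting", "performance", "metrics", "kpi", "kpis", "dashboard", "insight", "insights", "data"]),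
  ("Stakeholder & communication", PySem.Set.ofList ["stakeholder", "stakeholders", "communication", "communications", "present", "presentation", "presentations", "collaborate", "collaboration", "coordinate", "coordination", "manage", "management", "client", "clients", "partner", "partners", "marketing"]),
  ("Operations & planning", PySem.Set.ofList ["plan", "planning", "strategy", "strategic", "execute", "execution", "activities", "timeline", "project", "projects", "operations", "operational", "process"]),
  ("Customer & market engagement", PySem.Set.ofList ["customer", "customers", "audience", "audiences", "retention", "satisfaction", "persona", "personas", "market", "markets", "survey"]),
  ("Tools & platforms", PySem.Set.ofList ["tools", "platforms", "system", "systems", "crm", "hubspot", "salesforce", "excel", "powerpoint", "powerbi", "tableau", "google", "analytics"]),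
  ("Compliance & governance", PySem.Set.ofList ["policy", "policies", "regulation", "regulations", "governance", "risk", "audit", "audits"])]

-- shared module-level helper _format_keywords_for_sentence
def pvFmt (words : List String) : String :=
  if words.isEmpty then ""
  else
    let ws := words.filter (fun w => !(w == ""))
    if ws.isEmpty then ""
    else if ws.length == 1 then PySem.List.pyGetD ws 0 ""
    else if ws.length == 2 then PySem.List.pyGetD ws 0 "" ++ " and " ++ PySem.List.pyGetD ws 1 ""
    else PySem.Str.join ", " (PySem.List.slice ws none (some (-1))) ++ ", and " ++ PySem.List.pyGetD ws (-1) ""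

-- A's theme loop: per theme, re-filter all keywords against the vocab and the growing `used` set
def pvALoop (ks : List String) (max_items : Int) :
    List (String × PySem.Set String) → PySem.Set String → List String → PySem.Set String × List String
  | [], used, stmts => (used, stmts)
  | (theme, vocab) :: rest, used, stmts =>
    let matched := ks.filter (fun kw => PySem.Set.contains vocab kw && !(PySem.Set.contains used kw))
    if matched.isEmpty then pvALoop ks max_items rest used stmts
    else
      let stmts' := stmts ++ [theme ++ ": emphasise " ++ pvFmt (matched.take 4) ++ "."]
      let used' := PySem.Set.update used matched
      if max_items ≤ (stmts'.length : Int) then (used', stmts')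
      else pvALoop ks max_items rest used' stmts'

-- A's leftover loop: for i in range(0, len(leftovers), 3) with break once max_items is reached
def pvAChunkLoop (max_items : Int) (left : List String) : List Int → List String → List String
  | [], stmts => stmts
  | i :: rest, stmts =>
    let chunk := PySem.List.slice left (some i) (some (i + 3))
    let stmts' := stmts ++ ["Highlight relevant experience with " ++ pvFmt chunk ++ "."]
    if max_items ≤ (stmts'.length : Int) then stmts'
    else pvAChunkLoop max_items left rest stmts'

def summarise_keyword_themes_py (keywords : List String) (max_items : Int) : List String :=
  let ks := (keywords.filter (fun k => 2 < PySem.Str.len k)).map PySem.Str.lower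
  if ks.isEmpty then []
  else
    let r := pvALoop ks max_items pvThemes PySem.Set.empty []
    let leftovers := ks.filter (fun kw => !(PySem.Set.contains r.1 kw))
    if !leftovers.isEmpty && (r.2.length : Int) < max_items then
      pvAChunkLoop max_items leftovers (PySem.List.pyRange 0 (PySem.List.len leftovers) 3) r.2
    else r.2

-- ===== PORT B =====
-- B's sieve: bucket each keyword into the first theme whose vocab contains it, removing it from the pool
def pvGroups : List (String × PySem.Set String) → List String → List (String × List String)
  | [], _ => []
  | (theme, vocab) :: rest, remaining =>
    (theme, remaining.filter (fun kw => PySem.Set.contains vocab kw)) ::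
      pvGroups rest (remaining.filter (fun kw => !(PySem.Set.contains vocab kw)))

-- B's emission loop over the precomputed groups
def pvBEmit (max_items : Int) :
    List (String × List String) → PySem.Set String → List String → PySem.Set String × List String
  | [], used, stmts => (used, stmts)
  | (theme, group) :: rest, used, stmts =>
    if group.isEmpty then pvBEmit max_items rest used stmts
    else
      let stmts' := stmts ++ [theme ++ ": emphasise " ++ pvFmt (group.take 4) ++ "."]
      let used' := PySem.Set.update used group
      if max_items ≤ (stmts'.length : Int) then (used', stmts')
      else pvBEmit max_items rest used' stmts'

def summarise_keyword_themes_py_alt (keywords : List String) (max_items : Int) : List String :=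
  let ks := (keywords.filter (fun k => 2 < PySem.Str.len k)).map PySem.Str.lower
  let r := pvBEmit max_items (pvGroups pvThemes ks) PySem.Set.empty []
  let leftovers := ks.filter (fun kw => !(PySem.Set.contains r.1 kw))
  let room := max_items - (r.2.length : Int)
  if 0 < room then
    let chunks := (PySem.List.pyRange 0 (PySem.List.len leftovers) 3).map
      (fun i => PySem.List.slice leftovers (some i) (some (i + 3)))
    r.2 ++ (chunks.map (fun c => "Highlight relevant experience with " ++ pvFmt c ++ ".")).take room.toNat
  else r.2

-- ===== PRECONDITION & SPEC =====
def Spec_summarise_keyword_themes_py (keywords : List String) (max_items : Int) (out : List String) : Prop := out = summarise_keyword_themes_py_alt keywords max_items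
instance (keywords : List String) (max_items : Int) (out : List String) : Decidable (Spec_summarise_keyword_themes_py keywords max_items out) := by unfold Spec_summarise_keyword_themes_py; infer_instance

-- ===== CLAIM (what is proved, stated in full; the proofs are below) =====
def Claim_equal_summarise_keyword_themes_py : Prop := ∀ (keywords : List String) (max_items : Int), Dom_summarise_keyword_themes_py keywords max_items → Spec_summarise_keyword_themes_py keywords max_items (summarise_keyword_themes_py keywords max_items)

-- ===== LEMMAS AND PROOFS =====

-- proof-side view of B's chunk comprehension as structural recursion
def pvChunks : List String → List (List String)
  | [] => []
  | x :: xs => (x :: xs).take 3 :: pvChunks ((x :: xs).drop 3)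
  termination_by l => l.length
  decreasing_by simp [List.length_drop]


-- B's emission over empty groups is a no-op.
theorem pv_groups_nil (m : Int) :
    ∀ (ts : List (String × PySem.Set String)) (used : PySem.Set String) (stmts : List String),
    pvBEmit m (pvGroups ts []) used stmts = (used, stmts) := by
  intro ts
  induction ts with
  | nil => intro used stmts; rfl
  | cons hd rest ih =>
    obtain ⟨t, v⟩ := hd
    intro used stmts
    simp [pvGroups, pvBEmit, ih]

-- B's sieve groups are exactly A's per-theme `matched` lists: the loops agree step for step.
theorem pv_emit_eq (ks : List String) (m : Int) :
    ∀ (ts : List (String × PySem.Set String)) (used : PySem.Set String) (stmts : List String),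
    pvBEmit m (pvGroups ts (ks.filter (fun kw => !(PySem.Set.contains used kw)))) used stmts
      = pvALoop ks m ts used stmts := by
  intro ts
  induction ts with
  | nil => intro used stmts; simp [pvGroups, pvBEmit, pvALoop]
  | cons hd rest ih =>
    obtain ⟨theme, vocab⟩ := hd
    intro used stmts
    have hg : (ks.filter (fun kw => !(PySem.Set.contains used kw))).filter
          (fun kw => PySem.Set.contains vocab kw)
        = ks.filter (fun kw => PySem.Set.contains vocab kw && !(PySem.Set.contains used kw)) := by
      rw [List.filter_filter]
    simp only [pvGroups, pvBEmit, pvALoop, hg]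
    set matched := ks.filter (fun kw => PySem.Set.contains vocab kw && !(PySem.Set.contains used kw)) with hmdef
    by_cases hM : matched.isEmpty
    · simp only [hM, if_true]
      have h0 : ∀ a ∈ ks, (PySem.Set.contains vocab a && !(PySem.Set.contains used a)) = false := by
        intro a ha
        have := List.filter_eq_nil_iff.mp (List.isEmpty_iff.mp hM) a ha
        simpa using this
      have hrem : (ks.filter (fun kw => !(PySem.Set.contains used kw))).filter
            (fun kw => !(PySem.Set.contains vocab kw))
          = ks.filter (fun kw => !(PySem.Set.contains used kw)) := by
        rw [List.filter_filter]
        refine List.filter_congr ?_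
        intro a ha
        have := h0 a ha
        cases hu : PySem.Set.contains used a <;> cases hv : PySem.Set.contains vocab a <;>
          simp_all
      rw [hrem, ih]
    · simp only [hM]
      have hkey : ∀ a ∈ ks,
          (!(PySem.Set.contains vocab a) && !(PySem.Set.contains used a))
            = !(PySem.Set.contains (PySem.Set.update used matched) a) := by
        intro a ha
        have hmem : a ∈ PySem.Set.update used matched ↔ a ∈ used ∨ a ∈ matched :=
          PySem.Set.mem_update _ _ _
        have hmm : a ∈ matched ↔ (PySem.Set.contains vocab a && !(PySem.Set.contains used a)) = true := by
          rw [hmdef, List.mem_filter]; simp [ha]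
        cases hu : PySem.Set.contains used a <;> cases hv : PySem.Set.contains vocab a <;>
          simp_all
      have hrem : (ks.filter (fun kw => !(PySem.Set.contains used kw))).filter
            (fun kw => !(PySem.Set.contains vocab kw))
          = ks.filter (fun kw => !(PySem.Set.contains (PySem.Set.update used matched) kw)) := by
        rw [List.filter_filter]
        exact List.filter_congr hkey
      rw [hrem]
      split_ifs
      all_goals first | contradiction | rfl | exact ih _ _

theorem pv_range3_nil {b : Int} (h : b ≤ 0) : PySem.List.pyRange 0 b 3 = [] := by
  rw [PySem.List.pyRange_of_pos _ _ (by norm_num)]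
  have : ¬ ((0:Int) < b) := by omega
  simp [this]

theorem pv_range3_cons {n : Int} (h : 0 < n) :
    PySem.List.pyRange 0 n 3 = 0 :: (PySem.List.pyRange 0 (n - 3) 3).map (· + 3) := by
  rw [PySem.List.pyRange_of_pos _ _ (by norm_num : (0:Int) < 3),
      PySem.List.pyRange_of_pos _ _ (by norm_num : (0:Int) < 3)]
  have hc : (if (0:Int) < n then ((n - 0 + 3 - 1) / 3).toNat else 0)
      = (if (0:Int) < n - 3 then ((n - 3 - 0 + 3 - 1) / 3).toNat else 0) + 1 := by
    by_cases h3 : (0:Int) < n - 3 <;> simp only [h, h3, if_true, if_false] <;> omega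
  rw [hc, List.range_succ_eq_map, List.map_cons, List.map_map, List.map_map]
  refine congrArg₂ _ (by norm_num) (List.map_congr_left ?_)
  intro a _
  simp only [Function.comp_apply]
  push_cast
  ring

theorem pv_range3_nonneg {n x : Int} (hx : x ∈ PySem.List.pyRange 0 n 3) : 0 ≤ x := by
  rw [PySem.List.pyRange_of_pos _ _ (by norm_num : (0:Int) < 3)] at hx
  obtain ⟨k, _, rfl⟩ := List.mem_map.mp hx
  positivity

theorem pv_slice_shift {i : Int} (hi : 0 ≤ i) (left : List String) :
    PySem.List.slice left (some (i + 3)) (some (i + 3 + 3))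
      = PySem.List.slice (left.drop 3) (some i) (some (i + 3)) := by
  rw [PySem.List.slice_toNat _ (by omega) (by omega), PySem.List.slice_toNat _ hi (by omega),
      List.drop_drop]
  congr 1
  · omega
  congr 1
  omega

theorem pv_shift (m : Int) (left : List String) :
    ∀ (idxs : List Int) (stmts : List String), (∀ i ∈ idxs, 0 ≤ i) →
    pvAChunkLoop m left (idxs.map (· + 3)) stmts = pvAChunkLoop m (left.drop 3) idxs stmts := by
  intro idxs
  induction idxs with
  | nil => intro stmts _; rfl
  | cons i rest ih =>
    intro stmts hnn
    have hi : 0 ≤ i := hnn i (by simp)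
    have hslice := pv_slice_shift hi left
    simp only [List.map_cons, pvAChunkLoop, hslice]
    split_ifs with hb
    · rfl
    · exact ih _ (fun j hj => hnn j (by simp [hj]))

theorem pv_chunks_eq :
    ∀ (n : Nat) (left : List String), left.length = n →
    (PySem.List.pyRange 0 (PySem.List.len left) 3).map
        (fun i => PySem.List.slice left (some i) (some (i + 3)))
      = pvChunks left := by
  intro n
  induction n using Nat.strong_induction_on with
  | _ n ih =>
    intro left hlen
    match left, hlen with
    | [], _ =>
      rw [pv_range3_nil (by simp [PySem.List.len_eq])]
      simp [pvChunks]
    | x :: xs, hlen =>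
      have hpos : (0:Int) < PySem.List.len (x :: xs) := by
        simp only [PySem.List.len_eq, List.length_cons]
        omega
      rw [pv_range3_cons hpos, List.map_cons, List.map_map]
      have hc0 : PySem.List.slice (x :: xs) (some 0) (some (0 + 3)) = (x :: xs).take 3 := by
        rw [PySem.List.slice_toNat _ (by norm_num) (by norm_num)]
        simp
      rw [hc0]
      have htl : ((PySem.List.pyRange 0 (PySem.List.len (x :: xs) - 3) 3).map
            ((fun i => PySem.List.slice (x :: xs) (some i) (some (i + 3))) ∘ (· + 3)))
          = (PySem.List.pyRange 0 (PySem.List.len ((x :: xs).drop 3)) 3).map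
            (fun i => PySem.List.slice ((x :: xs).drop 3) (some i) (some (i + 3))) := by
        rw [List.map_congr_left (fun a ha => by
          simp only [Function.comp_apply]
          exact pv_slice_shift (pv_range3_nonneg ha) (x :: xs))]
        congr 1
        by_cases h3 : 3 ≤ (x :: xs).length
        · simp only [PySem.List.len_eq, List.length_drop]
          congr 1
          omega
        · rw [PySem.List.len_eq, PySem.List.len_eq,
              pv_range3_nil (by omega),
              pv_range3_nil (by simp only [List.length_drop]; omega)]
      rw [htl, ih ((x :: xs).drop 3).length
          (by simp only [List.length_drop, List.length_cons] at hlen ⊢; omega) _ rfl]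
      conv_rhs => rw [pvChunks]

theorem pv_chunk_loop (m : Int) :
    ∀ (left stmts : List String), (stmts.length : Int) < m →
    pvAChunkLoop m left (PySem.List.pyRange 0 (PySem.List.len left) 3) stmts
      = stmts ++ ((pvChunks left).map (fun c => "Highlight relevant experience with " ++ pvFmt c ++ ".")).take (m - (stmts.length : Int)).toNat := by
  suffices H : ∀ (n : Nat) (left stmts : List String), left.length = n → (stmts.length : Int) < m →
      pvAChunkLoop m left (PySem.List.pyRange 0 (PySem.List.len left) 3) stmts
      = stmts ++ ((pvChunks left).map (fun c => "Highlight relevant experience with " ++ pvFmt c ++ ".")).take (m - (stmts.length : Int)).toNat by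
    intro left stmts h; exact H left.length left stmts rfl h
  intro n
  induction n using Nat.strong_induction_on with
  | _ n ih =>
    intro left stmts hlen hm
    match left, hlen with
    | [], _ =>
      simp [pvChunks, pvAChunkLoop, PySem.List.len, PySem.List.pyRange]
    | x :: xs, hlen =>
      have hpos : (0:Int) < PySem.List.len (x :: xs) := by
        simp only [PySem.List.len_eq, List.length_cons]
        omega
      rw [pv_range3_cons hpos]
      simp only [pvAChunkLoop]
      have hc0 : PySem.List.slice (x :: xs) (some 0) (some (0 + 3)) = (x :: xs).take 3 := by
        rw [PySem.List.slice_toNat _ (by norm_num) (by norm_num)]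
        simp
      rw [hc0]
      have hlen' : ((stmts ++ ["Highlight relevant experience with " ++ pvFmt ((x :: xs).take 3) ++ "."]).length : Int) = (stmts.length : Int) + 1 := by
        simp
      split_ifs with hb
      · -- break: m - stmts.length = exactly 1
        have hr : (m - (stmts.length : Int)).toNat = 1 := by
          rw [hlen'] at hb; omega
        rw [hr]
        conv_rhs => rw [pvChunks]
        simp
      · -- continue
        rw [hlen'] at hb
        have htail : (PySem.List.pyRange 0 (PySem.List.len (x :: xs) - 3) 3)
            = PySem.List.pyRange 0 (PySem.List.len ((x :: xs).drop 3)) 3 := by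
          by_cases h3 : 3 ≤ (x :: xs).length
          · simp only [PySem.List.len_eq, List.length_drop]
            congr 1
            omega
          · rw [PySem.List.len_eq, PySem.List.len_eq,
                pv_range3_nil (by omega),
                pv_range3_nil (by simp only [List.length_drop]; omega)]
        rw [htail, pv_shift m (x :: xs) _ _ (fun j hj => pv_range3_nonneg hj)]
        rw [ih ((x :: xs).drop 3).length
            (by simp only [List.length_drop, List.length_cons] at hlen ⊢; omega) _ _ rfl
            (by simp only [List.length_append, List.length_cons, List.length_nil]; push_cast; omega)]
        conv_rhs => rw [pvChunks]
        rw [hlen']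
        simp only [List.map_cons]
        have hr : (m - (stmts.length : Int)).toNat = ((m - ((stmts.length : Int) + 1)).toNat) + 1 := by omega
        rw [hr, List.take_succ_cons]
        simp

-- leftovers phase: A's guarded break-out loop equals B's guarded truncation.
theorem pv_tail_eq (m : Int) (left stmts : List String) :
    (if !left.isEmpty && (stmts.length : Int) < m then
       pvAChunkLoop m left (PySem.List.pyRange 0 (PySem.List.len left) 3) stmts
     else stmts)
    = (if 0 < m - (stmts.length : Int) then
         stmts ++ (((PySem.List.pyRange 0 (PySem.List.len left) 3).map
             (fun i => PySem.List.slice left (some i) (some (i + 3)))).map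
           (fun c => "Highlight relevant experience with " ++ pvFmt c ++ ".")).take (m - (stmts.length : Int)).toNat
       else stmts) := by
  rw [pv_chunks_eq left.length left rfl]
  rcases left with _ | ⟨x, xs⟩
  · simp [pvChunks]
  · by_cases hm : (stmts.length : Int) < m
    · have hc1 : (!(x :: xs).isEmpty && decide ((stmts.length : Int) < m)) = true := by
        simp [hm]
      have hc2 : 0 < m - (stmts.length : Int) := by omega
      rw [if_pos hc1, if_pos hc2, pv_chunk_loop m (x :: xs) stmts hm]
    · have hc2 : ¬ (0 < m - (stmts.length : Int)) := by omega
      rw [if_neg (by simp [hm]), if_neg hc2]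

theorem pv_main (keywords : List String) (m : Int) :
    summarise_keyword_themes_py keywords m = summarise_keyword_themes_py_alt keywords m := by
  simp only [summarise_keyword_themes_py, summarise_keyword_themes_py_alt]
  set ks := (keywords.filter (fun k => 2 < PySem.Str.len k)).map PySem.Str.lower with hks
  by_cases h : ks.isEmpty
  · have hnil : ks = [] := List.isEmpty_iff.mp h
    rw [hnil, pv_groups_nil]
    simp [pv_range3_nil, PySem.List.len_eq]
  · rw [if_neg (by simp [h])]
    have hfilter : ks.filter (fun kw => !(PySem.Set.contains PySem.Set.empty kw)) = ks := by
      simp [PySem.Set.contains, PySem.Set.empty]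
    have hr : pvBEmit m (pvGroups pvThemes ks) PySem.Set.empty []
        = pvALoop ks m pvThemes PySem.Set.empty [] := by
      conv_lhs => rw [← hfilter]
      exact pv_emit_eq ks m pvThemes _ _
    rw [hr]
    exact pv_tail_eq m _ _

-- ===== VERDICT (by name: the statement is the Claim_ definition above) =====
theorem summarise_keyword_themes_py_spec : Claim_equal_summarise_keyword_themes_py := by
  intro keywords max_items _
  show summarise_keyword_themes_py keywords max_items = summarise_keyword_themes_py_alt keywords max_items
  exact pv_main keywords max_items
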